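-- pv_equiv track=rewrite | github.com/Zzhanp/bit_keyword | help_func.py | order_dict
-- ===== SOURCE A (Python) =====
-- def order_dict(dicts, n):
--     result = []
--     result1 = []
--     result2 = []
--     p = sorted([(k, v) for k, v in dicts.items()], reverse=True)
--     s = set()
--     for i in p:
--         s.add(i[1])
--     for i in sorted(s, reverse=True)[:n]:
--         for j in p:
--             if j[1] == i:
--                 result.append(j)
--     for r in result:
--         result1.append(r[0])
--         result2.append(r[1])
--     rankr = dict(zip(result1, result2))
--     return rankr
-- ===== SOURCE B (Python) =====
-- def order_dict(dicts, n):
--     buckets = {}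
--     for k, v in dicts.items():
--         buckets.setdefault(v, []).append(k)
--     out = {}
--     for v in sorted(buckets, reverse=True)[:n]:
--         for k in sorted(buckets[v], reverse=True):
--             out[k] = v
--     return out
-- ===== Notes on version B (the rewrite author's own statement) =====
-- stated objective: faster
-- what changed: B replaces A's full sort of all items plus a rescan of the whole item list for each of the top-n distinct values by a one-pass value->keys bucket dict, then sorts only the distinct values and each selected bucket once.
import Mathlib
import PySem

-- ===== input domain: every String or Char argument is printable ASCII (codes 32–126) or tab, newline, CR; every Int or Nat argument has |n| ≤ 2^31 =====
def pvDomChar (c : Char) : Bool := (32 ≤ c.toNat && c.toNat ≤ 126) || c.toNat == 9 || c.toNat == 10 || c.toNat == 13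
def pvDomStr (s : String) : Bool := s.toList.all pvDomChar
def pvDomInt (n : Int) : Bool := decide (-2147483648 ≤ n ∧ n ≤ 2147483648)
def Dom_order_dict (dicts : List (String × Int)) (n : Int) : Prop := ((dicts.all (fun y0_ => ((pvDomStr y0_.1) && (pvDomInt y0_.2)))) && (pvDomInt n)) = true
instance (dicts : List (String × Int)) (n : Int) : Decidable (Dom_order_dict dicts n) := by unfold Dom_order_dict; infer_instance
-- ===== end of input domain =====

-- B groups entries by value in one dict pass and sorts only the distinct values and the selected
-- buckets, instead of A's full sort of all items plus a rescan of every item per selected value.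

-- ===== PORT A =====
def order_dict (dicts : List (String × Int)) (n : Int) : List (String × Int) :=
  -- p = sorted([(k, v) for k, v in dicts.items()], reverse=True)
  let p := PySem.List.sorted2 dicts Prod.fst Prod.snd true
  -- s = set(); for i in p: s.add(i[1])
  let s := p.foldl (fun s i => PySem.Set.add s i.2) PySem.Set.empty
  -- for i in sorted(s, reverse=True)[:n]: for j in p: if j[1] == i: result.append(j)
  let result := (PySem.List.slice (PySem.List.sorted s (fun x => x) true) none (some n)).foldl
    (fun result i => p.foldl (fun result j => if j.2 == i then result ++ [j] else result) result) []
  -- for r in result: result1.append(r[0]); result2.append(r[1])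
  let rs := result.foldl (fun acc r => (acc.1 ++ [r.1], acc.2 ++ [r.2])) ([], [])
  -- rankr = dict(zip(result1, result2))
  let rankr := PySem.Dict.ofList (rs.1.zip rs.2)
  rankr.items

-- ===== PORT B =====
def order_dict_alt (dicts : List (String × Int)) (n : Int) : List (String × Int) :=
  -- buckets = {}; for k, v in dicts.items(): buckets.setdefault(v, []).append(k)
  let buckets := dicts.foldl (fun d kv => d.modify kv.2 [] (fun ks => ks ++ [kv.1])) PySem.Dict.empty
  -- out = {}; for v in sorted(buckets, reverse=True)[:n]: for k in sorted(buckets[v], reverse=True): out[k] = v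
  let out := (PySem.List.slice (PySem.List.sorted buckets.keys (fun x => x) true) none (some n)).foldl
    (fun out v => (PySem.List.sorted (buckets.getD v []) (fun x => x) true).foldl
      (fun out k => out.insert k v) out) PySem.Dict.empty
  out.items

-- ===== PRECONDITION & SPEC =====
-- A Python dict cannot hold two entries with the same key, so association lists with duplicate keys
-- do not represent any actual input of A; Pre_ admits exactly the lists that are genuine dicts.
def Pre_order_dict (dicts : List (String × Int)) (n : Int) : Prop := (dicts.map Prod.fst).Nodup
instance (dicts : List (String × Int)) (n : Int) : Decidable (Pre_order_dict dicts n) := by unfold Pre_order_dict; infer_instance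
def pvWitness_order_dict : (List (String × Int)) × Int := ([("a", 1), ("b", 2), ("c", 1)], 1)
def Spec_order_dict (dicts : List (String × Int)) (n : Int) (out : List (String × Int)) : Prop := out = order_dict_alt dicts n
instance (dicts : List (String × Int)) (n : Int) (out : List (String × Int)) : Decidable (Spec_order_dict dicts n out) := by unfold Spec_order_dict; infer_instance

-- ===== CLAIM (what is proved, stated in full; the proofs are below) =====
def Claim_equal_order_dict : Prop := ∀ (dicts : List (String × Int)) (n : Int), Dom_order_dict dicts n → Pre_order_dict dicts n → Spec_order_dict dicts n (order_dict dicts n)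

-- ===== LEMMAS AND PROOFS =====

-- the common canonical form both ports are reduced to
def pvChunk (dicts : List (String × Int)) (v : Int) : List (String × Int) :=
  PySem.List.sorted (dicts.filter (fun q => q.2 == v)) Prod.fst true

def pvTop (dicts : List (String × Int)) (n : Int) : List Int :=
  PySem.List.slice (PySem.List.sorted (PySem.Set.ofList (dicts.map Prod.snd)) (fun x => x) true) none (some n)

def pvCanon (dicts : List (String × Int)) (n : Int) : List (String × Int) :=
  (pvTop dicts n).flatMap (pvChunk dicts)

-- insertion (insertBy) preserves Pairwise for a relation compatible with the comparator
lemma pv_pairwise_insertBy {α : Type} (before : α → α → Bool) (Q : α → α → Prop)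
    (h1 : ∀ a b, before a b = true → Q a b) (h2 : ∀ a b, before a b = false → Q b a)
    (h3 : ∀ a b c, Q a b → Q b c → Q a c) (x : α) (l : List α) (hl : l.Pairwise Q) :
    (PySem.List.insertBy before x l).Pairwise Q := by
  induction l with
  | nil => simp [PySem.List.insertBy]
  | cons y ys ih =>
    rw [List.pairwise_cons] at hl
    obtain ⟨hy, hys⟩ := hl
    by_cases hb : before x y = true
    · rw [PySem.List.insertBy, if_pos hb]
      refine List.pairwise_cons.2 ⟨?_, List.pairwise_cons.2 ⟨hy, hys⟩⟩
      intro z hz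
      rcases List.mem_cons.1 hz with hz | hz
      · exact hz ▸ h1 x y hb
      · exact h3 x y z (h1 x y hb) (hy z hz)
    · rw [PySem.List.insertBy, if_neg hb]
      refine List.pairwise_cons.2 ⟨?_, ih hys⟩
      intro z hz
      rcases (PySem.List.mem_insertBy before x z ys).1 hz with hz | hz
      · exact hz ▸ h2 x y (Bool.eq_false_iff.2 hb)
      · exact hy z hz

lemma pv_pairwise_foldl_insertBy {α : Type} (before : α → α → Bool) (Q : α → α → Prop)
    (h1 : ∀ a b, before a b = true → Q a b) (h2 : ∀ a b, before a b = false → Q b a)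
    (h3 : ∀ a b c, Q a b → Q b c → Q a c) (xs : List α) (acc : List α) (hacc : acc.Pairwise Q) :
    (xs.foldl (fun acc x => PySem.List.insertBy before x acc) acc).Pairwise Q := by
  induction xs generalizing acc with
  | nil => exact hacc
  | cons x xs ih =>
    exact ih _ (pv_pairwise_insertBy before Q h1 h2 h3 x acc hacc)

-- the reverse-sorted item list of A is pairwise lexicographically non-increasing
lemma pv_sorted2_pairwise (dicts : List (String × Int)) :
    (PySem.List.sorted2 dicts Prod.fst Prod.snd true).Pairwise
      (fun a b => b.1 < a.1 ∨ (b.1 = a.1 ∧ b.2 ≤ a.2)) := by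
  have h := pv_pairwise_foldl_insertBy
    (fun a b : String × Int => decide (b.1 < a.1) || (!decide (a.1 < b.1) && decide (b.2 < a.2)))
    (fun a b : String × Int => b.1 < a.1 ∨ (b.1 = a.1 ∧ b.2 ≤ a.2))
    ?_ ?_ ?_ dicts [] List.Pairwise.nil
  · simpa [PySem.List.sorted2] using h
  · intro a b hb
    simp only [Bool.or_eq_true, Bool.and_eq_true, Bool.not_eq_eq_eq_not, Bool.not_true,
      decide_eq_true_eq, decide_eq_false_iff_not] at hb
    rcases hb with hb | ⟨hb1, hb2⟩
    · exact Or.inl hb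
    · rcases lt_trichotomy a.1 b.1 with h3 | h3 | h3
      · exact absurd h3 hb1
      · exact Or.inr ⟨h3.symm, le_of_lt hb2⟩
      · exact Or.inl h3
  · intro a b hb
    simp only [Bool.or_eq_false_iff, Bool.and_eq_false_iff, Bool.not_eq_eq_eq_not, Bool.not_false,
      decide_eq_false_iff_not, decide_eq_true_eq] at hb
    obtain ⟨hb1, hb2⟩ := hb
    rcases lt_trichotomy a.1 b.1 with h3 | h3 | h3
    · exact Or.inl h3
    · refine Or.inr ⟨h3, ?_⟩
      rcases hb2 with hb2 | hb2
      · exact absurd hb2 (by simp [h3])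
      · exact le_of_not_gt hb2
    · exact absurd h3 hb1
  · intro a b c hab hbc
    rcases hab with hab | ⟨hab1, hab2⟩ <;> rcases hbc with hbc | ⟨hbc1, hbc2⟩
    · exact Or.inl (lt_trans hbc hab)
    · exact Or.inl (hbc1 ▸ hab)
    · exact Or.inl (hab1 ▸ hbc)
    · exact Or.inr ⟨hbc1.trans hab1, le_trans hbc2 hab2⟩

-- reverse-sorting the set of either of two member-equal lists gives the same list
lemma pv_sortedRevSet_eq (xs ys : List Int) (h : ∀ x, x ∈ xs ↔ x ∈ ys) :
    PySem.List.sorted (PySem.Set.ofList xs) (fun x => x) true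
      = PySem.List.sorted (PySem.Set.ofList ys) (fun x => x) true := by
  have hndy : (PySem.List.sorted (PySem.Set.ofList ys) (fun x => x) true).Nodup :=
    ((PySem.List.sorted_perm (PySem.Set.ofList ys) (fun x => x) true).symm).nodup
      (PySem.Set.nodup_ofList ys)
  apply PySem.List.sorted_rev_eq_of_perm_of_pairwise_gt
  · refine (PySem.List.sorted_perm (PySem.Set.ofList ys) (fun x => x) true).trans ?_
    refine (List.perm_ext_iff_of_nodup (PySem.Set.nodup_ofList ys) (PySem.Set.nodup_ofList xs)).2 ?_
    intro a
    rw [PySem.Set.mem_ofList, PySem.Set.mem_ofList]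
    exact (h a).symm
  · have hle := PySem.List.sorted_pairwise_rev (PySem.Set.ofList ys) (fun x => x)
    exact (hndy.and hle).imp (fun {a b} hab => lt_of_le_of_ne hab.2 (Ne.symm hab.1))

-- distinct-key lists: equal first components force equal pairs
lemma pv_key_inj {dicts : List (String × Int)} (hnd : (dicts.map Prod.fst).Nodup)
    {a b : String × Int} (ha : a ∈ dicts) (hb : b ∈ dicts) (hf : a.1 = b.1) : a = b :=
  List.inj_on_of_nodup_map hnd ha hb hf

-- A's scan of p for value v yields exactly the reverse-sorted bucket of v
lemma pv_filter_sorted2 (dicts : List (String × Int)) (hnd : (dicts.map Prod.fst).Nodup) (v : Int) :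
    (PySem.List.sorted2 dicts Prod.fst Prod.snd true).filter (fun j => j.2 == v) = pvChunk dicts v := by
  unfold pvChunk
  have hperm := PySem.List.sorted2_perm dicts Prod.fst Prod.snd true
  symm
  apply PySem.List.sorted_rev_eq_of_perm_of_pairwise_gt
  · exact hperm.filter _
  · have hpf := (pv_sorted2_pairwise dicts).sublist (List.filter_sublist (p := fun j => j.2 == v))
    have hndf : (((PySem.List.sorted2 dicts Prod.fst Prod.snd true).filter
        (fun j => j.2 == v)).map Prod.fst).Nodup :=
      (((hperm.map Prod.fst).symm).nodup hnd).sublist (List.filter_sublist.map Prod.fst)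
    have hne := List.pairwise_map.1 hndf
    exact (hne.and hpf).imp (fun {a b} hab => by
      rcases hab.2 with h | h
      · exact h
      · exact absurd h.1.symm hab.1)

-- B's reverse-sorted bucket, tagged with its value, is the same chunk
lemma pv_bucket_sorted (dicts : List (String × Int)) (hnd : (dicts.map Prod.fst).Nodup) (v : Int) :
    (PySem.List.sorted ((dicts.filter (fun q => q.2 == v)).map Prod.fst) (fun x => x) true).map
      (fun k => (k, v)) = pvChunk dicts v := by
  unfold pvChunk
  have hks : ((dicts.filter (fun q => q.2 == v)).map Prod.fst).Nodup :=
    hnd.sublist (List.filter_sublist.map Prod.fst)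
  have hsp := PySem.List.sorted_perm ((dicts.filter (fun q => q.2 == v)).map Prod.fst)
    (fun x => x) true
  symm
  apply PySem.List.sorted_rev_eq_of_perm_of_pairwise_gt
  · refine (hsp.map (fun k => (k, v))).trans ?_
    rw [List.map_map]
    have : ∀ q ∈ dicts.filter (fun q => q.2 == v), ((fun k => (k, v)) ∘ Prod.fst) q = q := by
      intro q hq
      have := (List.mem_filter.1 hq).2
      simp only [beq_iff_eq] at this
      simp [Function.comp, ← this]
    rw [List.map_congr_left this]
    simp
  · rw [List.pairwise_map]
    simp only
    have hndk : (PySem.List.sorted ((dicts.filter (fun q => q.2 == v)).map Prod.fst)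
        (fun x => x) true).Nodup := (hsp.symm).nodup hks
    have hle := PySem.List.sorted_pairwise_rev ((dicts.filter (fun q => q.2 == v)).map Prod.fst)
      (fun x => x)
    exact (hndk.and hle).imp (fun {a b} hab => lt_of_le_of_ne hab.2 (Ne.symm hab.1))

-- chunk keys are distinct, and chunks of distinct values share no key
lemma pv_chunk_keys_nodup (dicts : List (String × Int)) (hnd : (dicts.map Prod.fst).Nodup) (v : Int) :
    ((pvChunk dicts v).map Prod.fst).Nodup := by
  unfold pvChunk
  have hks : ((dicts.filter (fun q => q.2 == v)).map Prod.fst).Nodup :=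
    hnd.sublist (List.filter_sublist.map Prod.fst)
  exact (((PySem.List.sorted_perm _ Prod.fst true).map Prod.fst).symm).nodup hks

lemma pv_chunk_mem (dicts : List (String × Int)) {v : Int} {q : String × Int}
    (hq : q ∈ pvChunk dicts v) : q ∈ dicts ∧ q.2 = v := by
  unfold pvChunk at hq
  rw [PySem.List.mem_sorted, List.mem_filter] at hq
  exact ⟨hq.1, by simpa using hq.2⟩

lemma pv_chunk_disjoint (dicts : List (String × Int)) (hnd : (dicts.map Prod.fst).Nodup)
    {v w : Int} (hvw : v ≠ w) {k : String}
    (hv : k ∈ (pvChunk dicts v).map Prod.fst) (hw : k ∈ (pvChunk dicts w).map Prod.fst) : False := by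
  obtain ⟨qv, hqv, hkv⟩ := List.mem_map.1 hv
  obtain ⟨qw, hqw, hkw⟩ := List.mem_map.1 hw
  obtain ⟨hqv1, hqv2⟩ := pv_chunk_mem dicts hqv
  obtain ⟨hqw1, hqw2⟩ := pv_chunk_mem dicts hqw
  have : qv = qw := pv_key_inj hnd hqv1 hqw1 (by rw [hkv, hkw])
  exact hvw (by rw [← hqv2, this, hqw2])

-- the canonical result has pairwise-distinct keys
lemma pv_canon_keys_nodup (dicts : List (String × Int)) (hnd : (dicts.map Prod.fst).Nodup)
    (T : List Int) (hT : T.Nodup) :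
    ((T.flatMap (pvChunk dicts)).map Prod.fst).Nodup := by
  rw [List.map_flatMap, List.nodup_flatMap]
  refine ⟨fun v _ => pv_chunk_keys_nodup dicts hnd v, ?_⟩
  exact hT.imp (fun {v w} hvw k hv hw => pv_chunk_disjoint dicts hnd hvw hv hw)

-- inserting a list of pairs with globally fresh distinct keys into a dict appends them
lemma pv_ofList_items (l : List (String × Int)) (h : (l.map Prod.fst).Nodup) :
    (PySem.Dict.ofList l).items = l := by
  show (l.foldl (fun acc p => acc.insert p.1 p.2) PySem.Dict.empty).items = l
  rw [PySem.Dict.items_foldl_insert_fresh l Prod.fst Prod.snd PySem.Dict.empty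
    (fun a _ => PySem.Dict.contains_empty a.1) h]
  simp [PySem.Dict.empty]

-- A's port equals the canonical form
lemma pv_A_canon (dicts : List (String × Int)) (n : Int) (hnd : (dicts.map Prod.fst).Nodup) :
    order_dict dicts n = pvCanon dicts n := by
  unfold order_dict pvCanon
  dsimp only
  have hperm := PySem.List.sorted2_perm dicts Prod.fst Prod.snd true
  -- the value set built from p equals the value set of dicts, reverse-sorted
  rw [← PySem.Set.update_map_eq_foldl_add _ Prod.snd PySem.Set.empty]
  have hVnd : (PySem.List.sorted (PySem.Set.ofList (dicts.map Prod.snd)) (fun x => x) true).Nodup :=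
    ((PySem.List.sorted_perm _ (fun x => x) true).symm).nodup (PySem.Set.nodup_ofList _)
  have hsets : PySem.Set.empty.update ((PySem.List.sorted2 dicts Prod.fst Prod.snd true).map Prod.snd)
      = PySem.Set.ofList ((PySem.List.sorted2 dicts Prod.fst Prod.snd true).map Prod.snd) :=
    PySem.Set.update_empty _
  rw [hsets, pv_sortedRevSet_eq _ (dicts.map Prod.snd) (fun x => (hperm.map Prod.snd).mem_iff)]
  -- the two result loops are a flatMap of filters, i.e. of chunks
  simp only [PySem.List.foldl_append_if (p := fun j : String × Int => j.2 == _) (f := fun j : String × Int => j)]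
  simp only [PySem.List.foldl_append_eq_flatMap, List.map_id', List.nil_append]
  have hfun : (fun i => (PySem.List.sorted2 dicts Prod.fst Prod.snd true).filter (fun j => j.2 == i))
      = pvChunk dicts := funext (pv_filter_sorted2 dicts hnd)
  rw [hfun]
  -- the two unzip accumulators are the two projections, zipped back to the list itself
  rw [PySem.List.foldl_prod_mk (fun (s : List String) (e : String × Int) => s ++ [e.1])
    (fun (s : List Int) (e : String × Int) => s ++ [e.2])]
  rw [PySem.List.foldl_append_singleton_eq_map, PySem.List.foldl_append_singleton_eq_map]
  simp only [List.nil_append, List.zip_map']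
  have hTnd : (PySem.List.slice (PySem.List.sorted (PySem.Set.ofList (dicts.map Prod.snd))
      (fun x => x) true) none (some n)).Nodup :=
    ((List.take_sublist _ _).trans (List.drop_sublist _ _)).nodup hVnd
  have hres := pv_canon_keys_nodup dicts hnd _ hTnd
  rw [show (fun r : String × Int => (r.1, r.2)) = id from funext (fun r => rfl), List.map_id]
  exact pv_ofList_items _ hres

-- chunk keys are exactly the bucket keys
lemma pv_chunk_fst_mem (dicts : List (String × Int)) (v : Int) (k : String) :
    k ∈ (pvChunk dicts v).map Prod.fst ↔ k ∈ (dicts.filter (fun q => q.2 == v)).map Prod.fst :=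
  ((PySem.List.sorted_perm _ Prod.fst true).map Prod.fst).mem_iff

-- B's outer loop: items of the built dict are the concatenated chunks
lemma pv_B_loop (dicts : List (String × Int)) (hnd : (dicts.map Prod.fst).Nodup)
    (T : List Int) (hT : T.Nodup) (o : PySem.Dict String Int)
    (ho : ∀ v ∈ T, ∀ k ∈ (pvChunk dicts v).map Prod.fst, o.contains k = false) :
    (T.foldl (fun out v =>
        (PySem.List.sorted ((dicts.filter (fun q => q.2 == v)).map Prod.fst) (fun x => x) true).foldl
          (fun out k => out.insert k v) out) o).items
      = o.items ++ T.flatMap (pvChunk dicts) := by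
  induction T generalizing o with
  | nil => simp
  | cons v T ih =>
    rw [List.foldl_cons, List.flatMap_cons]
    have hks : ((dicts.filter (fun q => q.2 == v)).map Prod.fst).Nodup :=
      hnd.sublist (List.filter_sublist.map Prod.fst)
    have hsnd : (PySem.List.sorted ((dicts.filter (fun q => q.2 == v)).map Prod.fst)
        (fun x => x) true).Nodup := ((PySem.List.sorted_perm _ _ true).symm).nodup hks
    have hfresh : ∀ a ∈ PySem.List.sorted ((dicts.filter (fun q => q.2 == v)).map Prod.fst)
        (fun x => x) true, o.contains a = false := by
      intro a ha
      rw [PySem.List.mem_sorted] at ha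
      exact ho v (List.mem_cons_self) a ((pv_chunk_fst_mem dicts v a).2 ha)
    have hinner := PySem.Dict.items_foldl_insert_fresh
      (PySem.List.sorted ((dicts.filter (fun q => q.2 == v)).map Prod.fst) (fun x => x) true)
      (fun k => k) (fun _ => v) o hfresh (by simpa using hsnd)
    have hinner' : (List.foldl (fun out k => out.insert k v) o
        (PySem.List.sorted ((dicts.filter (fun q => q.2 == v)).map Prod.fst) (fun x => x) true)).items
        = o.items ++ pvChunk dicts v := by
      rw [hinner, ← pv_bucket_sorted dicts hnd v]
    rw [ih (hT.sublist (List.sublist_cons_self v T)) _ ?_, hinner', List.append_assoc]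
    intro w hw k hk
    have hkeys := PySem.Dict.keys_foldl_insert
      (PySem.List.sorted ((dicts.filter (fun q => q.2 == v)).map Prod.fst) (fun x => x) true)
      (fun _ _ => v) o
    rw [← Bool.not_eq_true, PySem.Dict.contains_iff_mem_keys, hkeys, PySem.Set.mem_update]
    rintro (hmem | hmem)
    · have := ho w (List.mem_cons_of_mem v hw) k hk
      rw [← Bool.not_eq_true, PySem.Dict.contains_iff_mem_keys] at this
      exact this hmem
    · rw [PySem.List.mem_sorted] at hmem
      have hvw : v ≠ w := fun h => (List.nodup_cons.1 hT).1 (h ▸ hw)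
      exact pv_chunk_disjoint dicts hnd hvw ((pv_chunk_fst_mem dicts v k).2 hmem) hk

-- B's port equals the canonical form
lemma pv_B_canon (dicts : List (String × Int)) (n : Int) (hnd : (dicts.map Prod.fst).Nodup) :
    order_dict_alt dicts n = pvCanon dicts n := by
  unfold order_dict_alt pvCanon pvTop
  dsimp only
  rw [PySem.Dict.keys_foldl_modify_key dicts Prod.snd [] (fun _ kv => fun ks => ks ++ [kv.1])
    PySem.Dict.empty, PySem.Dict.keys_empty, PySem.Set.update_nil_left]
  have hbucket : ∀ v : Int, (dicts.foldl (fun d kv => d.modify kv.2 [] (fun ks => ks ++ [kv.1]))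
      PySem.Dict.empty).getD v [] = (dicts.filter (fun q => q.2 == v)).map Prod.fst := by
    intro v
    have h := PySem.Dict.getD_foldl_modify_append (dicts.map (fun q => (q.2, q.1)))
      PySem.Dict.empty v
    rw [List.foldl_map] at h
    simpa [List.filter_map, List.map_map, Function.comp, PySem.Dict.getD_empty] using h
  simp only [hbucket]
  have hVnd : (PySem.List.sorted (PySem.Set.ofList (dicts.map Prod.snd)) (fun x => x) true).Nodup :=
    ((PySem.List.sorted_perm _ (fun x => x) true).symm).nodup (PySem.Set.nodup_ofList _)
  have hTnd : (PySem.List.slice (PySem.List.sorted (PySem.Set.ofList (dicts.map Prod.snd))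
      (fun x => x) true) none (some n)).Nodup :=
    ((List.take_sublist _ _).trans (List.drop_sublist _ _)).nodup hVnd
  rw [pv_B_loop dicts hnd _ hTnd PySem.Dict.empty
    (fun v _ k _ => PySem.Dict.contains_empty k)]
  simp [PySem.Dict.empty]

-- ===== VERDICT (by name: the statement is the Claim_ definition above) =====
theorem order_dict_spec : Claim_equal_order_dict := by
  intro dicts n _ hnd
  unfold Spec_order_dict
  rw [pv_A_canon dicts n hnd, pv_B_canon dicts n hnd]
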